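-- pv_equiv track=rewrite | github.com/derekgauger/competitive_programming | Search/coast_line.py | coast_length
-- ===== SOURCE A (Python) =====
-- def search_and_fill(grid, i, j):
--     rows = len(grid)
--     columns = len(grid[0])
--     # Check if position is connected to the '0' region
--     # Can't be off the edge of the grid
--     if i < 0 or i >= rows or j < 0 or j >= columns or grid[i][j] != 0:
--         return
--     # Mark the region as connected
--     grid[i][j] = -1
--     # Search the connected cells
--     search_and_fill(grid, i - 1, j)
--     search_and_fill(grid, i + 1, j)
--     search_and_fill(grid, i, j - 1)
--     search_and_fill(grid, i, j + 1)
--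
-- def coast_length(grid):
--     rows = len(grid)
--     columns = len(grid[0])
--     # Create a new grid surrounded by water '0's
--     new_rows = rows + 2
--     new_columns = columns + 2
--     new_grid = [[0 for _ in range(new_columns)] for _ in range(new_rows)]
--     for i in range(rows):
--         new_grid[i + 1][1:-1] = grid[i]
--
--     # Flood fill the water point 0,0 is guaranteed to be water
--     # Convert the surrounded grid into a graph
--     # Use negative numbers to represent an edge since positive number are used for
--     # indicating land
--     search_and_fill(new_grid, 0, 0)
--
--     # Every non-marked location contributes to the coastline
--     # NOTE: Start at index 1 and end at (new_rows/new_columns) - 1 since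
--     # We know the new_grid is surrounded by 0
--     coast = 0
--     for i in range(1, new_rows - 1):
--         for j in range(1, new_columns - 1):
--             # Search for an isalnd mark
--             # NOTE: Water was marked as '-1' in the search and flood
--             if new_grid[i][j] == -1:
--                 continue
--
--             # Found an isalnd segment check if it is bordered by water# If so, it is on the coast.
--             if new_grid[i - 1][j] == -1:
--                 coast += 1
--
--             if new_grid[i + 1][j] == -1:
--                 coast += 1
--
--             if new_grid[i][j + 1] == -1:
--                 coast += 1
--
--             if new_grid[i][j - 1] == -1:
--                 coast += 1
--     return coast
-- ===== SOURCE B (Python) =====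
-- def coast_length(grid):
--     # Iterative flood fill (explicit stack) + padded grid built by concatenation + sum-comprehension count.
--     c = len(grid[0])
--     g = [[0] * (c + 2)] + [[0] + list(row) + [0] for row in grid] + [[0] * (c + 2)]
--     stack = [(0, 0)]
--     while stack:
--         i, j = stack.pop()
--         if 0 <= i < len(g) and 0 <= j < len(g[0]) and g[i][j] == 0:
--             g[i][j] = -1
--             stack += [(i, j + 1), (i, j - 1), (i + 1, j), (i - 1, j)]
--     return sum(
--         sum(1 for di, dj in ((-1, 0), (1, 0), (0, 1), (0, -1)) if g[i + di][j + dj] == -1)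
--         for i in range(1, len(g) - 1)
--         for j in range(1, len(g[0]) - 1)
--         if g[i][j] != -1
--     )
-- ===== Notes on version B (the rewrite author's own statement) =====
-- stated objective: alternative
-- what changed: Replaces the recursive depth-first flood fill by an iterative fill with an explicit stack, builds the padded grid by list concatenation instead of allocate-then-slice-assign, and computes the coastline as a sum comprehension instead of accumulator double loops.
import Mathlib
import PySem

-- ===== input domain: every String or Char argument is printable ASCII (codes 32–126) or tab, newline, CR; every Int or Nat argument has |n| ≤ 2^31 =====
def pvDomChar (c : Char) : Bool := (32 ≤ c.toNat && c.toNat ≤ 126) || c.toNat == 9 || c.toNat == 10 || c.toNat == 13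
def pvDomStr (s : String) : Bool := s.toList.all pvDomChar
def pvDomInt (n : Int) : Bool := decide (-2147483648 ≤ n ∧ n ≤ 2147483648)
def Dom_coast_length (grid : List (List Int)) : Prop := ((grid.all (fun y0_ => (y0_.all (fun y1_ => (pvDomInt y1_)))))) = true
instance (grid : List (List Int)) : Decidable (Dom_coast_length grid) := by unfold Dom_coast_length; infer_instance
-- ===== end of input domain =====

-- B is an iterative flood fill with an explicit stack plus a sum-comprehension count, replacing
-- A's recursive fill and accumulator loops (objective: alternative decomposition, same cost).
-- Neither implementation mutates the caller's grid observably (A copies into a fresh padded grid).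

-- Shared cell primitives (both Pythons index the padded grid the same way).
-- pvRead g i j = g[i][j] after a bounds check against len(g) and len(g[0]); the default 1 is
-- returned only where Python would raise IndexError (a row shorter than row 0), which the
-- guards make unreachable on the padded grids both programs build under Pre_.
def pvRead (g : List (List Int)) (i j : Int) : Int :=
  (g.getD i.toNat []).getD j.toNat 1

def pvMark (g : List (List Int)) (i j : Int) : List (List Int) :=
  g.set i.toNat ((g.getD i.toNat []).set j.toNat (-1))

-- number of 0-cells, the termination measure / fuel bound for both fills
def pvZeros (g : List (List Int)) : Nat :=
  (g.map (fun r => r.countP (fun x => x == 0))).sum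

-- helper for the termination lemma: replacing a 0-cell by -1 loses exactly one counted zero
theorem countP_set_zero (l : List Int) (m : Nat) (h : m < l.length) (h0 : l[m] = 0) :
    (l.set m (-1)).countP (fun x => x == 0) + 1 = l.countP (fun x => x == 0) := by
  rw [List.set_eq_take_cons_drop (-1) h]
  conv_rhs => rw [← List.take_append_drop m l, ← List.getElem_cons_drop (h := h)]
  have hx : ((-1 : Int) == 0) = false := by decide
  simp only [List.countP_append, List.countP_cons, h0, hx, beq_self_eq_true, if_true,
    Bool.false_eq_true, if_false]
  omega

-- helper for the termination lemma: how List.sum changes under List.set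
theorem sum_set_nat (l : List Nat) (n a : Nat) (h : n < l.length) :
    (l.set n a).sum + l[n] = l.sum + a := by
  rw [List.set_eq_take_cons_drop a h]
  conv_rhs => rw [← List.take_append_drop n l, ← List.getElem_cons_drop (h := h)]
  simp only [List.sum_append, List.sum_cons]
  omega

-- marking an in-range 0-cell strictly decreases pvZeros (termination lemma, cited by pvFillLoop)
theorem pvZeros_mark_lt (g : List (List Int)) (i j : Int)
    (hi : 0 ≤ i) (hilt : i < (g.length : Int)) (h0 : pvRead g i j = 0) :
    pvZeros (pvMark g i j) < pvZeros g := by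
  have hn : i.toNat < g.length := by omega
  unfold pvRead at h0
  have hm : j.toNat < (g.getD i.toNat []).length := by
    by_contra hc
    rw [List.getD_eq_default] at h0
    · exact absurd h0 (by norm_num)
    · omega
  unfold pvZeros pvMark
  rw [List.map_set]
  have h0' : (g.getD i.toNat [])[j.toNat] = 0 := by
    rw [List.getD_eq_getElem _ _ hm] at h0; exact h0
  have h2 := countP_set_zero (g.getD i.toNat []) j.toNat hm h0'
  have h1 := sum_set_nat (g.map (fun r => r.countP (fun x => x == 0))) i.toNat
    (((g.getD i.toNat []).set j.toNat (-1)).countP (fun x => x == 0)) (by simpa using hn)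
  rw [List.getElem_map] at h1
  rw [← List.getD_eq_getElem g [] hn] at h1
  omega

-- ===== PORT A =====
-- A's recursion is not structural; fuel is a totalization guard only (coast_length passes
-- pvZeros new_grid + 1, which the lemmas below show is always enough: each recursive call
-- either stops or erases a 0-cell first).
def search_and_fill (fuel : Nat) (g : List (List Int)) (i j : Int) : List (List Int) :=
  match fuel with
  | 0 => g
  | f + 1 =>
    let rows : Int := g.length
    let columns : Int := (g.getD 0 []).length
    if i < 0 ∨ rows ≤ i ∨ j < 0 ∨ columns ≤ j ∨ pvRead g i j ≠ 0 then g
    else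
      let g0 := pvMark g i j
      let g1 := search_and_fill f g0 (i - 1) j
      let g2 := search_and_fill f g1 (i + 1) j
      let g3 := search_and_fill f g2 i (j - 1)
      search_and_fill f g3 i (j + 1)

def coast_length (grid : List (List Int)) : Int :=
  let rows := grid.length
  let columns := (grid.getD 0 []).length  -- grid[0]: Pre_ excludes the empty grid (IndexError)
  let new_rows := rows + 2
  let new_columns := columns + 2
  let init : List (List Int) := List.replicate new_rows (List.replicate new_columns 0)
  -- new_grid[i+1][1:-1] = grid[i] : slice assignment replaces elements 1 .. len-1 (exact)
  let new_grid := (List.range rows).foldl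
    (fun g i => g.set (i + 1)
      ((g.getD (i + 1) []).take 1 ++ grid.getD i [] ++
        (g.getD (i + 1) []).drop ((g.getD (i + 1) []).length - 1))) init
  let filled := search_and_fill (pvZeros new_grid + 1) new_grid 0 0
  (PySem.List.pyRange 1 ((new_rows : Int) - 1) 1).foldl (fun coast i =>
    (PySem.List.pyRange 1 ((new_columns : Int) - 1) 1).foldl (fun coast j =>
      if pvRead filled i j = -1 then coast
      else
        coast + (if pvRead filled (i - 1) j = -1 then 1 else 0)
              + (if pvRead filled (i + 1) j = -1 then 1 else 0)
              + (if pvRead filled i (j + 1) = -1 then 1 else 0)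
              + (if pvRead filled i (j - 1) = -1 then 1 else 0)) coast) 0

-- ===== PORT B =====
-- while stack: pop; guard; mark; push the four neighbours.  Python pops from the END of the
-- list, so the list head here is the stack top and `stack += [a,b,c,d]` becomes d::c::b::a::rest.
def pvFillLoop (g : List (List Int)) (s : List (Int × Int)) : List (List Int) :=
  match s with
  | [] => g
  | (i, j) :: rest =>
    if h : 0 ≤ i ∧ i < (g.length : Int) ∧ 0 ≤ j ∧ j < ((g.getD 0 []).length : Int) ∧
        pvRead g i j = 0 then
      pvFillLoop (pvMark g i j)
        ((i - 1, j) :: (i + 1, j) :: (i, j - 1) :: (i, j + 1) :: rest)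
    else
      pvFillLoop g rest
termination_by 5 * pvZeros g + s.length
decreasing_by
  · have := pvZeros_mark_lt g i j h.1 h.2.1 h.2.2.2.2
    simp only [List.length_cons]
    omega
  · simp only [List.length_cons]
    omega

def coast_length_alt (grid : List (List Int)) : Int :=
  let c := (grid.getD 0 []).length
  let pad : List Int := List.replicate (c + 2) 0
  let g := pad :: grid.map (fun row => 0 :: row ++ [0]) ++ [pad]
  let filled := pvFillLoop g [((0 : Int), (0 : Int))]
  ((PySem.List.pyRange 1 ((g.length : Int) - 1) 1).map (fun i =>
    ((PySem.List.pyRange 1 (((g.getD 0 []).length : Int) - 1) 1).map (fun j =>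
      if pvRead filled i j ≠ -1 then
        (if pvRead filled (i - 1) j = -1 then 1 else 0)
        + (if pvRead filled (i + 1) j = -1 then 1 else 0)
        + (if pvRead filled i (j + 1) = -1 then 1 else 0)
        + (if pvRead filled i (j - 1) = -1 then (1 : Int) else 0)
      else 0)).sum)).sum

-- ===== PRECONDITION & SPEC =====
-- Pre_ is exactly the set of inputs on which the Python A returns: it raises IndexError on the
-- empty grid (grid[0]) and whenever some row is shorter than row 0 (the counting pass indexes
-- every row up to len(grid[0])+1 in the padded grid).
def Pre_coast_length (grid : List (List Int)) : Prop :=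
  grid ≠ [] ∧ ∀ r ∈ grid, (grid.getD 0 []).length ≤ r.length
instance (grid : List (List Int)) : Decidable (Pre_coast_length grid) := by
  unfold Pre_coast_length; infer_instance
def pvWitness_coast_length : List (List Int) := ([[0, 1], [1, 1]])
def Spec_coast_length (grid : List (List Int)) (out : Int) : Prop := out = coast_length_alt grid
instance (grid : List (List Int)) (out : Int) : Decidable (Spec_coast_length grid out) := by
  unfold Spec_coast_length; infer_instance

-- ===== CLAIM (what is proved, stated in full; the proofs are below) =====
def Claim_equal_coast_length : Prop := ∀ (grid : List (List Int)), Dom_coast_length grid → Pre_coast_length grid → Spec_coast_length grid (coast_length grid)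

-- ===== LEMMAS AND PROOFS =====

theorem pvZeros_mono_fill (f : Nat) :
    ∀ g i j, pvZeros (search_and_fill f g i j) ≤ pvZeros g := by
  induction f with
  | zero => intro g i j; simp [search_and_fill]
  | succ f ih =>
    intro g i j
    rw [search_and_fill]
    split
    · exact le_refl _
    · next h =>
      push Not at h
      have hm := pvZeros_mark_lt g i j (by omega) (by omega) (by omega)
      exact le_trans (ih _ _ _) (le_trans (ih _ _ _) (le_trans (ih _ _ _)
        (le_trans (ih _ _ _) (le_of_lt hm))))

-- the explicit stack processes exactly the recursion's call tree, in the same order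
theorem fillLoop_cons (f : Nat) :
    ∀ g i j s, pvZeros g < f →
      pvFillLoop g ((i, j) :: s) = pvFillLoop (search_and_fill f g i j) s := by
  induction f with
  | zero => intro g i j s hlt; omega
  | succ f ih =>
    intro g i j s hlt
    rw [search_and_fill]
    by_cases hg : i < 0 ∨ (g.length : Int) ≤ i ∨ j < 0 ∨ ((g.getD 0 []).length : Int) ≤ j ∨
        pvRead g i j ≠ 0
    · rw [if_pos hg]
      rw [pvFillLoop, dif_neg (by omega)]
    · rw [if_neg hg]
      push Not at hg
      conv_lhs => rw [pvFillLoop]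
      rw [dif_pos (by omega)]
      have hm := pvZeros_mark_lt g i j (by omega) (by omega) (by omega)
      have m1 := pvZeros_mono_fill f (pvMark g i j) (i - 1) j
      have m2 := pvZeros_mono_fill f (search_and_fill f (pvMark g i j) (i - 1) j) (i + 1) j
      have m3 := pvZeros_mono_fill f
        (search_and_fill f (search_and_fill f (pvMark g i j) (i - 1) j) (i + 1) j) i (j - 1)
      rw [ih _ (i - 1) j _ (by omega), ih _ (i + 1) j _ (by omega), ih _ i (j - 1) _ (by omega),
        ih _ i (j + 1) _ (by omega)]

-- with ample fuel, A's recursive fill and B's stack loop compute the same filled grid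
theorem fill_eq_stack (g : List (List Int)) :
    search_and_fill (pvZeros g + 1) g 0 0 = pvFillLoop g [((0 : Int), (0 : Int))] := by
  have h := fillLoop_cons (pvZeros g + 1) g 0 0 [] (by omega)
  rw [h, pvFillLoop]

theorem getD_append_len {a : Type} (A B : List a) (d : a) :
    (A ++ B).getD A.length d = B.getD 0 d := by
  simp [List.getD, List.getElem?_append_right (Nat.le_refl _)]

theorem set_append_len {a : Type} (A B : List a) (v : a) :
    (A ++ B).set A.length v = A ++ B.set 0 v := by
  rw [List.set_append_right _ _ (Nat.le_refl _)]
  simp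

-- A's allocate-then-slice-assign construction yields B's concatenation, row by row
theorem build_inv (grid : List (List Int)) (c : Nat) :
    ∀ n, n ≤ grid.length →
    (List.range n).foldl
      (fun g i => g.set (i + 1)
        ((g.getD (i + 1) []).take 1 ++ grid.getD i [] ++
          (g.getD (i + 1) []).drop ((g.getD (i + 1) []).length - 1)))
      (List.replicate (grid.length + 2) (List.replicate (c + 2) (0 : Int)))
    = List.replicate (c + 2) (0 : Int) :: (grid.take n).map (fun row => 0 :: row ++ [0])
        ++ List.replicate (grid.length + 1 - n) (List.replicate (c + 2) (0 : Int)) := by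
  intro n
  induction n with
  | zero => intro _; simp [List.replicate_succ]
  | succ n ih =>
    intro h
    rw [List.range_succ, List.foldl_append, ih (by omega), List.foldl_cons, List.foldl_nil]
    have hA : ((grid.take n).map (fun row => (0 : Int) :: row ++ [0])).length = n := by
      simp; omega
    have hA' : (List.replicate (c + 2) (0 : Int) ::
        (grid.take n).map (fun row => (0 : Int) :: row ++ [0])).length = n + 1 := by
      simp
      omega
    have hgetD : ((List.replicate (c + 2) (0 : Int) ::
        (grid.take n).map (fun row => (0 : Int) :: row ++ [0])) ++
          List.replicate (grid.length + 1 - n) (List.replicate (c + 2) (0 : Int))).getD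
        (n + 1) [] = List.replicate (c + 2) (0 : Int) := by
      have hg := getD_append_len (List.replicate (c + 2) (0 : Int) ::
          (grid.take n).map (fun row => (0 : Int) :: row ++ [0]))
        (List.replicate (grid.length + 1 - n) (List.replicate (c + 2) (0 : Int))) []
      rw [hA'] at hg
      rw [hg, List.getD_replicate _ (by omega)]
    rw [hgetD]
    have hn : n < grid.length := by omega
    rw [List.getD_eq_getElem grid [] hn]
    have hs := set_append_len (List.replicate (c + 2) (0 : Int) ::
        (grid.take n).map (fun row => (0 : Int) :: row ++ [0]))
      (List.replicate (grid.length + 1 - n) (List.replicate (c + 2) (0 : Int)))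
      ((List.replicate (c + 2) (0 : Int)).take 1 ++ grid[n] ++
        (List.replicate (c + 2) (0 : Int)).drop ((List.replicate (c + 2) (0 : Int)).length - 1))
    rw [hA'] at hs
    rw [hs, List.take_succ_eq_append_getElem hn]
    have hB : List.replicate (grid.length + 1 - n) (List.replicate (c + 2) (0 : Int))
        = List.replicate (c + 2) (0 : Int) ::
          List.replicate (grid.length - n) (List.replicate (c + 2) (0 : Int)) := by
      rw [show grid.length + 1 - n = (grid.length - n) + 1 by omega, List.replicate_succ]
    rw [hB, List.set_cons_zero]
    simp [List.take_replicate, List.drop_replicate]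
    rw [List.take_succ_eq_append_getElem (by simpa using hn)]
    simp

-- the accumulator double loop of A is the sum-of-rows comprehension of B
theorem count_eq (F : List (List Int)) (R C : List Int) :
    R.foldl (fun coast i => C.foldl (fun coast j =>
      if pvRead F i j = -1 then coast
      else
        coast + (if pvRead F (i - 1) j = -1 then 1 else 0)
              + (if pvRead F (i + 1) j = -1 then 1 else 0)
              + (if pvRead F i (j + 1) = -1 then 1 else 0)
              + (if pvRead F i (j - 1) = -1 then 1 else 0)) coast) 0
    = (R.map (fun i => ((C.map (fun j =>
      if pvRead F i j ≠ -1 then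
        (if pvRead F (i - 1) j = -1 then 1 else 0)
        + (if pvRead F (i + 1) j = -1 then 1 else 0)
        + (if pvRead F i (j + 1) = -1 then 1 else 0)
        + (if pvRead F i (j - 1) = -1 then (1 : Int) else 0)
      else 0))).sum)).sum := by
  have hstep : ∀ i : Int, (fun (coast : Int) (j : Int) =>
      if pvRead F i j = -1 then coast
      else
        coast + (if pvRead F (i - 1) j = -1 then 1 else 0)
              + (if pvRead F (i + 1) j = -1 then 1 else 0)
              + (if pvRead F i (j + 1) = -1 then 1 else 0)
              + (if pvRead F i (j - 1) = -1 then 1 else 0))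
    = (fun (coast : Int) (j : Int) => coast +
      (if pvRead F i j ≠ -1 then
        (if pvRead F (i - 1) j = -1 then 1 else 0)
        + (if pvRead F (i + 1) j = -1 then 1 else 0)
        + (if pvRead F i (j + 1) = -1 then 1 else 0)
        + (if pvRead F i (j - 1) = -1 then (1 : Int) else 0)
      else 0)) := by
    intro i
    funext coast j
    split_ifs <;> omega
  have houter : (fun (coast : Int) (i : Int) => C.foldl (fun coast j =>
      if pvRead F i j = -1 then coast
      else
        coast + (if pvRead F (i - 1) j = -1 then 1 else 0)
              + (if pvRead F (i + 1) j = -1 then 1 else 0)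
              + (if pvRead F i (j + 1) = -1 then 1 else 0)
              + (if pvRead F i (j - 1) = -1 then 1 else 0)) coast)
    = (fun (coast : Int) (i : Int) => coast + ((C.map (fun j =>
      if pvRead F i j ≠ -1 then
        (if pvRead F (i - 1) j = -1 then 1 else 0)
        + (if pvRead F (i + 1) j = -1 then 1 else 0)
        + (if pvRead F i (j + 1) = -1 then 1 else 0)
        + (if pvRead F i (j - 1) = -1 then (1 : Int) else 0)
      else 0))).sum) := by
    funext coast i
    rw [hstep i, PySem.List.foldl_add]
  rw [houter, PySem.List.foldl_add, zero_add]

-- ===== VERDICT (by name: the statement is the Claim_ definition above) =====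
theorem coast_length_spec : Claim_equal_coast_length := by
  intro grid _ _
  unfold Spec_coast_length coast_length coast_length_alt
  have hbuild := build_inv grid (grid.getD 0 []).length grid.length (Nat.le_refl _)
  rw [List.take_length, show grid.length + 1 - grid.length = 1 by omega] at hbuild
  dsimp only
  rw [hbuild, fill_eq_stack, count_eq]
  simp
  rw [show ((grid.length : Int) + 2 - 1) = (grid.length : Int) + 1 by ring]
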